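-- pv_equiv track=rewrite | github.com/bernardesarthur/sscpoe | custom_components/sscpoe/protocol.py | encryptByte
-- ===== SOURCE A (Python) =====
-- TIMES = 32  # The number of iterations is recommended to be an integer multiple of 8.
--
-- BYTES = "qazwsxedc"  # Byte encrypted random character table, cannot be modified at will
--
-- def strToUtf8Bytes(s: str) -> bytes:
--     return bytes(s, "utf-8")
--
-- def encryptByte(b: int, keys: list[int], index: int) -> int:
--     ms = strToUtf8Bytes(BYTES)
--     m = ms[index % 8]
--     k = keys[index % 4]
--     s = b
--     for j in range(TIMES):
--         s += (((m << 2) + k)) ^ (((m >> 3) + k))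
--         s &= 0xFF
--     return s
-- ===== SOURCE B (Python) =====
-- # Table of byte values of "qazwsxedc"; loop collapsed to closed form (b + 32*c) % 256.
-- _M = [113, 97, 122, 119, 115, 120, 101, 100, 99]
--
-- def encryptByte(b: int, keys: list[int], index: int) -> int:
--     m = _M[index % 8]
--     k = keys[index % 4]
--     return (b + 32 * ((4 * m + k) ^ (m // 8 + k))) % 256
-- ===== Notes on version B (the rewrite author's own statement) =====
-- stated objective: simpler
-- what changed: B precomputes the character table as a literal list of byte values and replaces the 32-step add-and-mask loop by the single closed-form expression (b + 32*((4*m+k)^(m//8+k))) % 256, using plain arithmetic (4*m, m//8, % 256) instead of shifts, the & mask and the utf-8 encoding pass.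
import Mathlib
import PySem

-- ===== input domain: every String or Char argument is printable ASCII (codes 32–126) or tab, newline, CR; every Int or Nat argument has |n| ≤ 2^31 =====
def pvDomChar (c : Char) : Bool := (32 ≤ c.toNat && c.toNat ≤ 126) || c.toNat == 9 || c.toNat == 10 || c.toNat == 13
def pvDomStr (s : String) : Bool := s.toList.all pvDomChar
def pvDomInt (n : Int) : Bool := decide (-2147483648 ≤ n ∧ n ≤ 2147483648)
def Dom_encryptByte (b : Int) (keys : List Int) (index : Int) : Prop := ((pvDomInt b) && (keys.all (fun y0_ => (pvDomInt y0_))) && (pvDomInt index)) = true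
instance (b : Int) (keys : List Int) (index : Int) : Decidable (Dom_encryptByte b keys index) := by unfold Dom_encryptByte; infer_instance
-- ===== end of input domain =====

-- B replaces A's utf-8 encoding pass and 32-step add-and-mask loop by a literal byte table and
-- the closed form (b + 32*((4*m+k)^(m//8+k))) % 256 (objective: simpler).


-- ===== PORT A =====
def pyTIMES : Int := 32

def pyBYTES : String := "qazwsxedc"

-- bytes(s, "utf-8") as a list of byte values; exact for ASCII strings (pyBYTES is ASCII)
def strToUtf8Bytes (s : String) : List Int := s.toList.map (fun c => (c.toNat : Int))

def encryptByte (b : Int) (keys : List Int) (index : Int) : Int :=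
  let ms := strToUtf8Bytes pyBYTES
  let m := PySem.List.pyGetD ms (PySem.Int.mod index 8) 0
  let k := PySem.List.pyGetD keys (PySem.Int.mod index 4) 0
  (PySem.List.pyRange 0 pyTIMES 1).foldl
    (fun s _ => PySem.Int.band (s + PySem.Int.bxor ((m <<< 2) + k) ((m >>> 3) + k)) 255) b

-- ===== PORT B =====
-- _M in Source B: the byte values of "qazwsxedc" as a literal table
def byteTable : List Int := [113, 97, 122, 119, 115, 120, 101, 100, 99]

def encryptByte_alt (b : Int) (keys : List Int) (index : Int) : Int :=
  let m := PySem.List.pyGetD byteTable (PySem.Int.mod index 8) 0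
  let k := PySem.List.pyGetD keys (PySem.Int.mod index 4) 0
  PySem.Int.mod (b + 32 * PySem.Int.bxor (4 * m + k) (PySem.Int.floordiv m 8 + k)) 256

-- ===== PRECONDITION & SPEC =====
-- keys[index % 4] raises IndexError when the list is shorter than index % 4 + 1
def Pre_encryptByte (b : Int) (keys : List Int) (index : Int) : Prop :=
  PySem.Int.mod index 4 < (keys.length : Int)
instance (b : Int) (keys : List Int) (index : Int) : Decidable (Pre_encryptByte b keys index) := by unfold Pre_encryptByte; infer_instance
def pvWitness_encryptByte : Int × List Int × Int := (7, [1, 2, 3, 4], 5)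

def Spec_encryptByte (b : Int) (keys : List Int) (index : Int) (out : Int) : Prop := out = encryptByte_alt b keys index
instance (b : Int) (keys : List Int) (index : Int) (out : Int) : Decidable (Spec_encryptByte b keys index out) := by unfold Spec_encryptByte; infer_instance

-- ===== CLAIM (what is proved, stated in full; the proofs are below) =====
def Claim_equal_encryptByte : Prop := ∀ (b : Int) (keys : List Int) (index : Int), Dom_encryptByte b keys index → Pre_encryptByte b keys index → Spec_encryptByte b keys index (encryptByte b keys index)

-- ===== LEMMAS AND PROOFS =====

-- Python's x & 0xFF is x mod 256 (also on negatives)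
theorem band255 (x : Int) : PySem.Int.band x 255 = x % 256 := by
  unfold PySem.Int.band
  split_ifs with h1 h2 h2
  · show ((x.toNat &&& (255:Int).toNat : Nat) : Int) = x % 256
    have h : x.toNat &&& (255:Int).toNat = x.toNat % 256 := by
      simpa using Nat.and_two_pow_sub_one_eq_mod x.toNat 8
    rw [h]; omega
  · omega
  · show (((255:Int).toNat - ((255:Int).toNat &&& (-x-1).toNat) : Nat) : Int) = x % 256
    have h : (255:Int).toNat &&& (-x-1).toNat = (-x-1).toNat % 256 := by
      rw [Nat.land_comm]
      simpa using Nat.and_two_pow_sub_one_eq_mod (-x-1).toNat 8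
    rw [h]; omega
  · omega

-- accumulating a constant with a per-step mask equals one final mask
theorem foldl_mask (l : List Int) (b c : Int) (h : l ≠ []) :
    l.foldl (fun s _ => (s + c) % 256) b = (b + (l.length : Int) * c) % 256 := by
  induction l generalizing b with
  | nil => exact absurd rfl h
  | cons x t ih =>
    simp only [List.foldl_cons]
    rcases eq_or_ne t ([] : List Int) with ht | ht
    · subst ht; simp
    · rw [ih _ ht, Int.emod_add_emod]
      congr 1
      push_cast [List.length_cons]
      ring

-- A's utf-8 pass produces exactly B's literal table
theorem bytes_eq_table : strToUtf8Bytes pyBYTES = byteTable := by decide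

-- on the nine table bytes, shifts agree with B's plain arithmetic
theorem xor_arg_eq (m k : Int) (hm : m ∈ byteTable) :
    PySem.Int.bxor ((m <<< 2) + k) ((m >>> 3) + k)
      = PySem.Int.bxor (4 * m + k) (PySem.Int.floordiv m 8 + k) := by
  fin_cases hm <;>
    norm_num [show (113:Int) <<< (2:Int) = 452 from by decide,
              show (97:Int) <<< (2:Int) = 388 from by decide,
              show (122:Int) <<< (2:Int) = 488 from by decide,
              show (119:Int) <<< (2:Int) = 476 from by decide,
              show (115:Int) <<< (2:Int) = 460 from by decide,
              show (120:Int) <<< (2:Int) = 480 from by decide,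
              show (101:Int) <<< (2:Int) = 404 from by decide,
              show (100:Int) <<< (2:Int) = 400 from by decide,
              show (99:Int) <<< (2:Int) = 396 from by decide,
              show (113:Int) >>> (3:Int) = 14 from by decide,
              show (97:Int) >>> (3:Int) = 12 from by decide,
              show (122:Int) >>> (3:Int) = 15 from by decide,
              show (119:Int) >>> (3:Int) = 14 from by decide,
              show (115:Int) >>> (3:Int) = 14 from by decide,
              show (120:Int) >>> (3:Int) = 15 from by decide,
              show (101:Int) >>> (3:Int) = 12 from by decide,
              show (100:Int) >>> (3:Int) = 12 from by decide,
              show (99:Int) >>> (3:Int) = 12 from by decide]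

-- the m looked up at index % 8 is always one of the table bytes
theorem m_mem (index : Int) :
    PySem.List.pyGetD byteTable (PySem.Int.mod index 8) 0 ∈ byteTable := by
  have h0 : 0 ≤ PySem.Int.mod index 8 := PySem.Int.mod_nonneg index (by norm_num)
  have h8 : PySem.Int.mod index 8 < 8 := PySem.Int.mod_lt index (by norm_num)
  interval_cases (PySem.Int.mod index 8) <;> decide

-- ===== VERDICT (by name: the statement is the Claim_ definition above) =====
theorem encryptByte_spec : Claim_equal_encryptByte := by
  intro b keys index _ _
  show encryptByte b keys index = encryptByte_alt b keys index
  simp only [encryptByte, encryptByte_alt, bytes_eq_table, band255]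
  rw [foldl_mask _ _ _ (by decide),
      xor_arg_eq _ _ (m_mem index),
      PySem.Int.mod_eq_emod_of_pos (by norm_num : (0:Int) < 256)]
  norm_num [pyTIMES]
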